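-- pv_equiv track=rewrite | github.com/hson19/LINFO2364-p2 | template.py | spade_repr_from_transaction
-- ===== SOURCE A (Python) =====
-- from collections import defaultdict
--
-- def spade_repr_from_transaction(transactions):
--     spade_repr = defaultdict(list)
--     covers = {}
--     for tid, transaction in enumerate(transactions):
--         for i, item in enumerate(transaction):
--             try:
--                 covers[item].add(tid)
--             except KeyError:
--                 covers[item] = {tid}
--             try:
--                 spade_repr[item].append((tid, i))
--             except KeyError:
--                 spade_repr[item] = [(tid, i)]
--     # return {'repr': spade_repr, 'covers': covers}
--     return spade_repr, covers
-- ===== SOURCE B (Python) =====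
-- def spade_repr_from_transaction(transactions):
--     # Flatten once into a stream of (item, (tid, pos)) pairs; dedupe the items in
--     # first-occurrence order; preallocate one empty bucket per item; fill the
--     # buckets in a single flat pass; finally project covers out of the buckets.
--     pairs = [(item, (tid, i))
--              for tid, transaction in enumerate(transactions)
--              for i, item in enumerate(transaction)]
--     keys = list(dict.fromkeys(item for item, _ in pairs))
--     spade_repr = {k: [] for k in keys}
--     for it, pos in pairs:
--         spade_repr[it].append(pos)
--     covers = {k: {tid for tid, _ in v} for k, v in spade_repr.items()}
--     return spade_repr, covers
-- ===== Notes on version B (the rewrite author's own statement) =====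
-- stated objective: alternative
-- what changed: B replaces A's nested-loop try/except accumulation of two dicts in parallel by a staged pipeline: flatten the transactions into one (item,(tid,pos)) stream, dedupe the items in first-occurrence order with dict.fromkeys, preallocate an empty bucket per item, fill the buckets in one flat pass, and derive covers as a projection of the buckets.
import Mathlib
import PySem

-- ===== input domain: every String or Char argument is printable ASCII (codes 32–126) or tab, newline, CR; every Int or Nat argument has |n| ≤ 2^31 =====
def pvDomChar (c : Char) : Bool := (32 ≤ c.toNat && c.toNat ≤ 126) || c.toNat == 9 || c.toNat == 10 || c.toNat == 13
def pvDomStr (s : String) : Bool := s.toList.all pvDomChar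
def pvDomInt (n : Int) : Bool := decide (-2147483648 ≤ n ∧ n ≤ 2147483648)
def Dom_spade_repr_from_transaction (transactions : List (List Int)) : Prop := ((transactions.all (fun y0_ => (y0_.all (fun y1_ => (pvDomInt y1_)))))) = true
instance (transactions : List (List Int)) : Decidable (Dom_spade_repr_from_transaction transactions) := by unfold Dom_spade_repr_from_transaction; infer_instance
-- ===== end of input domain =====

-- B replaces A's nested try/except parallel accumulation by a staged pipeline:
-- flatten to one (item,(tid,pos)) stream, dedupe keys first-occurrence, preallocate
-- empty buckets, fill them in one flat pass, project covers out of the buckets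
-- (objective: alternative decomposition, same O(n) cost; return-value equivalence —
-- A returns a defaultdict, B a plain dict with the same items).


-- ===== PORT A =====
-- try/except KeyError update of covers[item] / spade_repr[item] is exactly
-- Dict.modify with the empty default (set resp. list); both dicts are updated
-- in the same nested enumerate loop, carried as a pair of dicts.
def spade_repr_from_transaction (transactions : List (List Int)) : (List (Int × List (Int × Int))) × (List (Int × List Int)) :=
  let st :=
    (PySem.List.enumerate transactions 0).foldl
      (fun st p =>
        (PySem.List.enumerate p.2 0).foldl
          (fun st q =>
            (st.1.modify q.2 [] (fun l => l ++ [(p.1, q.1)]),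
             st.2.modify q.2 PySem.Set.empty (fun s => PySem.Set.add s p.1)))
          st)
      ((PySem.Dict.empty : PySem.Dict Int (List (Int × Int))),
       (PySem.Dict.empty : PySem.Dict Int (PySem.Set Int)))
  (st.1.items, st.2.items)

-- ===== PORT B =====
-- pairs: the flattened [(item, (tid, i)) …] stream; dict.fromkeys dedup is
-- PySem.List.dedup; buckets preallocated per key, then filled in one flat pass;
-- covers is the projection comprehension over spade_repr.items().
def spade_repr_from_transaction_alt (transactions : List (List Int)) : (List (Int × List (Int × Int))) × (List (Int × List Int)) :=
  let pairs := (PySem.List.enumerate transactions 0).flatMap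
      (fun p => (PySem.List.enumerate p.2 0).map (fun q => (q.2, (p.1, q.1))))
  let keys := PySem.List.dedup (pairs.map Prod.fst)
  let d0 := keys.foldl (fun d k => d.insert k ([] : List (Int × Int))) PySem.Dict.empty
  let spade := pairs.foldl (fun d pr => d.modify pr.1 [] (fun l => l ++ [pr.2])) d0
  (spade.items, spade.items.map (fun kv => (kv.1, PySem.Set.ofList (kv.2.map Prod.fst))))

-- ===== PRECONDITION & SPEC =====
def Spec_spade_repr_from_transaction (transactions : List (List Int)) (out : (List (Int × List (Int × Int))) × (List (Int × List Int))) : Prop := out = spade_repr_from_transaction_alt transactions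
instance (transactions : List (List Int)) (out : (List (Int × List (Int × Int))) × (List (Int × List Int))) : Decidable (Spec_spade_repr_from_transaction transactions out) := by unfold Spec_spade_repr_from_transaction; infer_instance

-- ===== CLAIM (what is proved, stated in full; the proofs are below) =====
def Claim_equal_spade_repr_from_transaction : Prop := ∀ (transactions : List (List Int)), Dom_spade_repr_from_transaction transactions → Spec_spade_repr_from_transaction transactions (spade_repr_from_transaction transactions)

-- ===== LEMMAS AND PROOFS =====

-- The invariant carried through A's pair fold, relating covers to spade_repr.
def pvInv (sp : PySem.Dict Int (List (Int × Int))) (cov : PySem.Dict Int (PySem.Set Int)) : Prop :=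
  cov.keys = sp.keys ∧ sp.keys.Nodup ∧
    ∀ k, cov.getD k PySem.Set.empty = PySem.Set.ofList ((sp.getD k []).map Prod.fst)

theorem pvInv_step (sp : PySem.Dict Int (List (Int × Int))) (cov : PySem.Dict Int (PySem.Set Int))
    (h : pvInv sp cov) (item tid i : Int) :
    pvInv (sp.modify item [] (fun l => l ++ [(tid, i)]))
          (cov.modify item PySem.Set.empty (fun s => PySem.Set.add s tid)) := by
  obtain ⟨hk, hnd, hv⟩ := h
  have hc : cov.contains item = sp.contains item := by
    rw [PySem.Dict.contains_eq_decide_mem_keys, PySem.Dict.contains_eq_decide_mem_keys, hk]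
  refine ⟨?_, ?_, ?_⟩
  · rw [PySem.Dict.keys_modify, PySem.Dict.keys_modify]
    by_cases hcon : sp.contains item = true
    · rw [PySem.Dict.keys_insert_of_contains _ _ (hc ▸ hcon),
        PySem.Dict.keys_insert_of_contains _ _ hcon, hk]
    · have h1 : sp.contains item = false := by simpa using hcon
      rw [PySem.Dict.keys_insert_of_not_contains _ _ (hc ▸ h1),
        PySem.Dict.keys_insert_of_not_contains _ _ h1, hk]
  · rw [PySem.Dict.keys_modify]
    by_cases hcon : sp.contains item = true
    · rw [PySem.Dict.keys_insert_of_contains _ _ hcon]; exact hnd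
    · have h1 : sp.contains item = false := by simpa using hcon
      rw [PySem.Dict.keys_insert_of_not_contains _ _ h1]
      refine List.nodup_append.mpr ⟨hnd, List.nodup_singleton _, ?_⟩
      intro a ha b hb
      simp only [List.mem_singleton] at hb
      subst hb
      intro hab; subst hab
      have := (PySem.Dict.contains_iff_mem_keys sp a).mpr ha
      rw [this] at h1; cases h1
  · intro k
    rw [PySem.Dict.getD_modify, PySem.Dict.getD_modify]
    split_ifs with hke
    · rw [hv item, List.map_append, PySem.Set.ofList_eq_foldl, PySem.Set.ofList_eq_foldl,
        List.foldl_append]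
      rfl
    · exact hv k

theorem pvInv_inner (l : List (Int × Int)) (tid : Int)
    (sp : PySem.Dict Int (List (Int × Int))) (cov : PySem.Dict Int (PySem.Set Int))
    (h : pvInv sp cov) :
    pvInv (l.foldl (fun d q => d.modify q.2 [] (fun x => x ++ [(tid, q.1)])) sp)
          (l.foldl (fun d q => d.modify q.2 PySem.Set.empty (fun s => PySem.Set.add s tid)) cov) := by
  induction l generalizing sp cov with
  | nil => exact h
  | cons q rest ih => exact ih _ _ (pvInv_step sp cov h q.2 tid q.1)

theorem pvInv_outer (l : List (Int × List Int))
    (sp : PySem.Dict Int (List (Int × Int))) (cov : PySem.Dict Int (PySem.Set Int))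
    (h : pvInv sp cov) :
    pvInv (l.foldl (fun d p => (PySem.List.enumerate p.2 0).foldl
            (fun d q => d.modify q.2 [] (fun x => x ++ [(p.1, q.1)])) d) sp)
          (l.foldl (fun d p => (PySem.List.enumerate p.2 0).foldl
            (fun d q => d.modify q.2 PySem.Set.empty (fun s => PySem.Set.add s p.1)) d) cov) := by
  induction l generalizing sp cov with
  | nil => exact h
  | cons p rest ih => exact ih _ _ (pvInv_inner _ p.1 sp cov h)

-- the inner pair fold acts componentwise
theorem pvInner_pair (l : List (Int × Int)) (a : Int)
    (st : PySem.Dict Int (List (Int × Int)) × PySem.Dict Int (PySem.Set Int)) :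
    l.foldl (fun st q =>
        (st.1.modify q.2 [] (fun x => x ++ [(a, q.1)]),
         st.2.modify q.2 PySem.Set.empty (fun s => PySem.Set.add s a))) st
    = (l.foldl (fun d q => d.modify q.2 [] (fun x => x ++ [(a, q.1)])) st.1,
       l.foldl (fun d q => d.modify q.2 PySem.Set.empty (fun s => PySem.Set.add s a)) st.2) := by
  induction l generalizing st with
  | nil => rfl
  | cons q rest ih =>
    simp only [List.foldl_cons]
    exact ih _

-- A's pair fold is componentwise the two separate folds.
theorem pvPair_fold (l : List (Int × List Int))
    (st : PySem.Dict Int (List (Int × Int)) × PySem.Dict Int (PySem.Set Int)) :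
    l.foldl
      (fun st p =>
        (PySem.List.enumerate p.2 0).foldl
          (fun st q =>
            (st.1.modify q.2 [] (fun x => x ++ [(p.1, q.1)]),
             st.2.modify q.2 PySem.Set.empty (fun s => PySem.Set.add s p.1)))
          st)
      st
    = (l.foldl (fun d p => (PySem.List.enumerate p.2 0).foldl
          (fun d q => d.modify q.2 [] (fun x => x ++ [(p.1, q.1)])) d) st.1,
       l.foldl (fun d p => (PySem.List.enumerate p.2 0).foldl
          (fun d q => d.modify q.2 PySem.Set.empty (fun s => PySem.Set.add s p.1)) d) st.2) := by
  induction l generalizing st with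
  | nil => rfl
  | cons p rest ih =>
    simp only [List.foldl_cons]
    rw [pvInner_pair]
    exact ih _

-- the preallocation loop leaves every bucket empty
theorem pvGetD_prealloc (keys : List Int) (d : PySem.Dict Int (List (Int × Int)))
    (h : ∀ c, d.getD c [] = []) :
    ∀ c, (keys.foldl (fun d k => d.insert k ([] : List (Int × Int))) d).getD c [] = [] := by
  induction keys generalizing d with
  | nil => exact h
  | cons k rest ih =>
    refine ih _ (fun c => ?_)
    rw [PySem.Dict.getD_insert]
    split_ifs with hc
    · rfl
    · exact h c

-- A's nested spade_repr fold over transactions IS the fold over the flattened pair stream.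
theorem pvFlat_sp (l : List (Int × List Int)) (d : PySem.Dict Int (List (Int × Int))) :
    l.foldl (fun d p => (PySem.List.enumerate p.2 0).foldl
        (fun d q => d.modify q.2 [] (fun x => x ++ [(p.1, q.1)])) d) d
    = (l.flatMap (fun p => (PySem.List.enumerate p.2 0).map (fun q => (q.2, (p.1, q.1))))).foldl
        (fun d pr => d.modify pr.1 [] (fun x => x ++ [pr.2])) d := by
  induction l generalizing d with
  | nil => rfl
  | cons p rest ih =>
    simp only [List.foldl_cons, List.flatMap_cons, List.foldl_append, List.foldl_map]
    exact ih _

theorem spade_repr_from_transaction_spec : Claim_equal_spade_repr_from_transaction := by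
  intro transactions _
  unfold Spec_spade_repr_from_transaction spade_repr_from_transaction spade_repr_from_transaction_alt
  rw [pvPair_fold]
  have hinit : pvInv (PySem.Dict.empty : PySem.Dict Int (List (Int × Int)))
      (PySem.Dict.empty : PySem.Dict Int (PySem.Set Int)) :=
    ⟨rfl, List.nodup_nil, fun k => rfl⟩
  obtain ⟨hk, hnd, hv⟩ := pvInv_outer (PySem.List.enumerate transactions 0) _ _ hinit
  set pairs := (PySem.List.enumerate transactions 0).flatMap
      (fun p => (PySem.List.enumerate p.2 0).map (fun q => (q.2, (p.1, q.1)))) with hpairs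
  set sp := (PySem.List.enumerate transactions 0).foldl
      (fun d p => (PySem.List.enumerate p.2 0).foldl
        (fun d q => d.modify q.2 [] (fun x => x ++ [(p.1, q.1)])) d)
      (PySem.Dict.empty : PySem.Dict Int (List (Int × Int))) with hsp
  set cov := (PySem.List.enumerate transactions 0).foldl
      (fun d p => (PySem.List.enumerate p.2 0).foldl
        (fun d q => d.modify q.2 PySem.Set.empty (fun s => PySem.Set.add s p.1)) d)
      (PySem.Dict.empty : PySem.Dict Int (PySem.Set Int)) with hcov
  -- characterise sp via the flattened stream
  have hspflat : sp = pairs.foldl (fun d pr => d.modify pr.1 [] (fun x => x ++ [pr.2]))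
      (PySem.Dict.empty : PySem.Dict Int (List (Int × Int))) := by
    rw [hsp, pvFlat_sp]
  have hkeys : sp.keys = PySem.Set.ofList (pairs.map Prod.fst) := by
    rw [hspflat, PySem.Dict.keys_foldl_modify_key]
    rfl
  have hget : ∀ k, sp.getD k [] = (pairs.filter (fun pr => pr.1 == k)).map Prod.snd := by
    intro k
    rw [hspflat, PySem.Dict.getD_foldl_modify_append]
    rfl
  have hndc : cov.keys.Nodup := hk ▸ hnd
  -- B's side
  set keys := PySem.List.dedup (pairs.map Prod.fst) with hkeysdef
  have hndk : keys.Nodup := PySem.List.nodup_dedup _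
  set d0 := keys.foldl (fun d k => d.insert k ([] : List (Int × Int)))
      (PySem.Dict.empty : PySem.Dict Int (List (Int × Int))) with hd0
  have hkeys0 : d0.keys = keys := by
    rw [hd0, PySem.Dict.keys_foldl_insert]
    have : (PySem.Dict.empty : PySem.Dict Int (List (Int × Int))).keys = ([] : PySem.Set Int) := rfl
    rw [this, PySem.Set.update_nil_left]
    exact PySem.Set.ofList_eq_self_of_nodup _ hndk
  have hget0 : ∀ c, d0.getD c [] = [] := by
    rw [hd0]
    exact pvGetD_prealloc keys _ (fun c => rfl)
  set spb := pairs.foldl (fun d pr => d.modify pr.1 [] (fun l => l ++ [pr.2])) d0 with hspb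
  have hkeysB : spb.keys = keys := by
    rw [hspb, PySem.Dict.keys_foldl_modify_key, hkeys0]
    rw [PySem.Set.update_eq_append_filter]
    have hfil : (PySem.Set.ofList (pairs.map Prod.fst)).filter
        (fun y => !(PySem.Set.contains keys y)) = [] := by
      apply List.filter_eq_nil_iff.mpr
      intro y hy
      have : y ∈ keys := by
        rw [hkeysdef, PySem.List.mem_dedup]
        exact (PySem.Set.mem_ofList _ _).mp hy
      simpa using this
    rw [hfil, List.append_nil]
  have hgetB : ∀ c, spb.getD c [] = (pairs.filter (fun pr => pr.1 == c)).map Prod.snd := by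
    intro c
    rw [hspb, PySem.Dict.getD_foldl_modify_append, hget0 c, List.nil_append]
  have hspitems : sp.items = spb.items := by
    rw [PySem.Dict.items_eq_map_keys sp hnd [],
        PySem.Dict.items_eq_map_keys spb (hkeysB ▸ hndk) [], hkeys, hkeysB, hkeysdef,
        PySem.List.dedup_eq_ofList]
    exact List.map_congr_left fun k _ => by rw [hget k, hgetB k]
  change (sp.items, cov.items)
    = (spb.items, spb.items.map (fun kv => (kv.1, PySem.Set.ofList (kv.2.map Prod.fst))))
  rw [← hspitems, Prod.mk.injEq]
  refine ⟨rfl, ?_⟩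
  rw [PySem.Dict.items_eq_map_keys cov hndc PySem.Set.empty,
      PySem.Dict.items_eq_map_keys sp hnd [], hk, List.map_map]
  exact List.map_congr_left fun k _ => by
    simp only [Function.comp_apply]
    rw [hv k]
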